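-- pv_equiv track=rewrite | github.com/Primer-1-wy/PythonTask | 大数据12002王延逸凡.py | pro12
-- ===== SOURCE A (Python) =====
-- def pro12(num):
--     while(num%3!=0):
--         num-=1
--     if num==3:
--         return 1
--     if num==0:
--         return 1
--     return pro12(num-3)+pro12(num-6)
-- ===== SOURCE B (Python) =====
-- def pro12(num):
--     # Iterative Fibonacci DP over k = num // 3 (A computes Fib(k) by naive recursion).
--     a, b = 1, 1
--     for _ in range(num // 3):
--         a, b = b, a + b
--     return a
-- ===== Notes on version B (the rewrite author's own statement) =====
-- stated objective: faster
-- what changed: Replaces the naive exponential double recursion on multiples of 3 by an iterative two-variable Fibonacci loop over k = num // 3; intended as faster (a timing run read B 562x at the largest size where A still finished, A timed out beyond).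
import Mathlib
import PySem

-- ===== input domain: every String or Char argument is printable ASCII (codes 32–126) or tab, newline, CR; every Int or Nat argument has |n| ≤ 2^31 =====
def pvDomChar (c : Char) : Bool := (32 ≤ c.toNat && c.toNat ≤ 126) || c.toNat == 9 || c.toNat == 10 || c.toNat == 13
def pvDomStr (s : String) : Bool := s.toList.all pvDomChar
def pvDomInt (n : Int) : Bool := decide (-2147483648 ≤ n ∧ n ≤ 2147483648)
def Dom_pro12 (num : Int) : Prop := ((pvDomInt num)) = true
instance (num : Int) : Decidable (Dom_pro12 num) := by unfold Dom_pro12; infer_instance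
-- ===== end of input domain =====

-- B replaces A's exponential double recursion by an iterative Fibonacci loop over num // 3; intended as faster (probe measured 562x at the largest size where A finished).


-- ===== PORT A =====
-- Literal port of A. Python's while-loop (decrement until num % 3 == 0) is the first
-- branch; the fuel parameter and its 0-case are pure termination guards (fuel is chosen
-- large enough to be unreachable on every input where Python A terminates, i.e. num ≥ 0;
-- for num < 0 Python recurses without bound — outside Pre_pro12).
def pro12Go : Nat → Int → Int
  | 0, _ => 0
  | fuel + 1, num =>
    if PySem.Int.mod num 3 ≠ 0 then pro12Go fuel (num - 1)
    else if num = 3 then 1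
    else if num = 0 then 1
    else if num < 0 then 0
    else pro12Go fuel (num - 3) + pro12Go fuel (num - 6)

def pro12 (num : Int) : Int := pro12Go (num.toNat + 1) num

-- ===== PORT B =====
-- Port of B: two-variable Fibonacci fold over range(num // 3).
def pro12_alt (num : Int) : Int :=
  ((List.range (PySem.Int.floordiv num 3).toNat).foldl
      (fun (p : Int × Int) _ => (p.2, p.1 + p.2)) (1, 1)).1

-- ===== PRECONDITION & SPEC =====
-- Pre_ excludes num < 0, on which Python A recurses without bound (RecursionError).
def Pre_pro12 (num : Int) : Prop := 0 ≤ num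
instance (num : Int) : Decidable (Pre_pro12 num) := by unfold Pre_pro12; infer_instance
def pvWitness_pro12 : Int := (7)

def Spec_pro12 (num : Int) (out : Int) : Prop := out = pro12_alt num
instance (num : Int) (out : Int) : Decidable (Spec_pro12 num out) := by unfold Spec_pro12; infer_instance

-- ===== CLAIM (what is proved, stated in full; the proofs are below) =====
def Claim_equal_pro12 : Prop := ∀ (num : Int), Dom_pro12 num → Pre_pro12 num → Spec_pro12 num (pro12 num)

-- ===== LEMMAS AND PROOFS =====

def fib : Nat → Int
  | 0 => 1
  | 1 => 1
  | n + 2 => fib (n + 1) + fib n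

theorem foldl_fib (n : Nat) :
    (List.range n).foldl (fun (p : Int × Int) _ => (p.2, p.1 + p.2)) (1, 1)
      = (fib n, fib (n + 1)) := by
  induction n with
  | zero => simp [fib]
  | succ k ih =>
      rw [List.range_succ, List.foldl_append, ih]
      simp only [List.foldl_cons, List.foldl_nil, fib]
      exact Prod.ext rfl (add_comm _ _)

theorem pro12_alt_eq_fib (num : Int) (h : 0 ≤ num) :
    pro12_alt num = fib (num.toNat / 3) := by
  unfold pro12_alt
  rw [PySem.Int.floordiv_eq_ediv_of_pos (by omega : (0:Int) < 3)]
  rw [foldl_fib]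
  have e : (num / 3).toNat = num.toNat / 3 := by omega
  rw [e]

theorem pro12Go_eq_fib : ∀ (fuel : Nat) (n : Nat), n < fuel → pro12Go fuel (n : Int) = fib (n / 3) := by
  intro fuel
  induction fuel with
  | zero => intro n h; omega
  | succ f ihf =>
    intro n hn
    show (if PySem.Int.mod (n : Int) 3 ≠ 0 then pro12Go f ((n : Int) - 1)
      else if (n : Int) = 3 then 1
      else if (n : Int) = 0 then 1
      else if (n : Int) < 0 then 0
      else pro12Go f ((n : Int) - 3) + pro12Go f ((n : Int) - 6)) = fib (n / 3)
    rw [PySem.Int.mod_eq_emod_of_pos (by omega : (0:Int) < 3)]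
    by_cases hm : ((n : Int) % 3 ≠ 0)
    · rw [if_pos hm]
      have hn1 : (1:Nat) ≤ n := by omega
      have e : ((n : Int) - 1) = ((n - 1 : Nat) : Int) := by omega
      rw [e, ihf (n - 1) (by omega)]
      congr 1
      omega
    · rw [if_neg hm]
      push Not at hm
      by_cases h3 : (n : Int) = 3
      · have : n = 3 := by omega
        subst this; simp [fib]
      · rw [if_neg h3]
        by_cases h0 : (n : Int) = 0
        · have : n = 0 := by omega
          subst this; simp [fib]
        · rw [if_neg h0, if_neg (by omega : ¬ ((n : Int) < 0))]
          have hn6 : 6 ≤ n := by omega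
          have e3 : ((n : Int) - 3) = ((n - 3 : Nat) : Int) := by omega
          have e6 : ((n : Int) - 6) = ((n - 6 : Nat) : Int) := by omega
          rw [e3, e6, ihf (n - 3) (by omega), ihf (n - 6) (by omega)]
          have hk : ∃ k, n / 3 = k + 2 ∧ (n - 3) / 3 = k + 1 ∧ (n - 6) / 3 = k := by
            refine ⟨n / 3 - 2, by omega, by omega, by omega⟩
          obtain ⟨k, hk1, hk2, hk3⟩ := hk
          rw [hk1, hk2, hk3, fib]

theorem pro12_eq_fib (n : Nat) : pro12 (n : Int) = fib (n / 3) := by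
  unfold pro12
  have e : ((n : Int)).toNat = n := by omega
  rw [e]
  exact pro12Go_eq_fib (n + 1) n (by omega)

-- ===== VERDICT (by name: the statement is the Claim_ definition above) =====
theorem pro12_spec : Claim_equal_pro12 := by
  intro num _ hpre
  unfold Spec_pro12
  have h0 : (0:Int) ≤ num := hpre
  have : num = ((num.toNat : Nat) : Int) := by omega
  rw [this, pro12_eq_fib, pro12_alt_eq_fib _ (by omega)]
  have e : ((num.toNat : Int)).toNat = num.toNat := by omega
  rw [e]
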